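-- pv_equiv track=rewrite | github.com/hyf2018gdfz/lightweight-netdisk | app/utils/validators.py | clean_search_keyword
-- ===== SOURCE A (Python) =====
-- def clean_search_keyword(keyword: str) -> str:
--     """
--     清理搜索关键词
--
--     Args:
--         keyword: 原始关键词
--
--     Returns:
--         str: 清理后的关键词
--     """
--     if not keyword:
--         return ""
--
--     # 移除前后空格
--     keyword = keyword.strip()
--
--     # 限制长度
--     if len(keyword) > 100:
--         keyword = keyword[:100]
--
--     # 移除危险字符（防止SQL注入等）
--     dangerous_chars = ["'", '"', ";", "\\", "/", "*", "?", "<", ">", "|"]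
--     for char in dangerous_chars:
--         keyword = keyword.replace(char, "")
--
--     return keyword
-- ===== SOURCE B (Python) =====
-- DANGEROUS = frozenset(["'", '"', ";", "\\", "/", "*", "?", "<", ">", "|"])
--
--
-- def clean_search_keyword(keyword: str) -> str:
--     if not keyword:
--         return ""
--     keyword = keyword.strip()
--     if len(keyword) > 100:
--         keyword = keyword[:100]
--     return "".join(c for c in keyword if c not in DANGEROUS)
-- ===== Notes on version B (the rewrite author's own statement) =====
-- stated objective: idiomatic
-- what changed: Replaces the loop of ten full-string replace() rescans with a single pass that joins the characters not in a frozenset of dangerous characters.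
import Mathlib
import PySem

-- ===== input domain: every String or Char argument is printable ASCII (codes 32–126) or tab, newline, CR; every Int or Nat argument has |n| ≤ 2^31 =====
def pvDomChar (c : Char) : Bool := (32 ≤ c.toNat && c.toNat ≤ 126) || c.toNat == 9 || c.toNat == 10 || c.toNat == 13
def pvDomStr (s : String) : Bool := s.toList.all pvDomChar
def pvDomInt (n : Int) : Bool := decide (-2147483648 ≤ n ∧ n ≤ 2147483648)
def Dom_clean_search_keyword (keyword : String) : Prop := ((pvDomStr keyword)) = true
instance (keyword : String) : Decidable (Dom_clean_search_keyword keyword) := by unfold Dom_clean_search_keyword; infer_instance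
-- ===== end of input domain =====

-- B replaces A's ten full-string replace() rescans with one pass that keeps the characters
-- not in a set of the same dangerous characters (idiomatic); same return value everywhere.

-- ===== PORT A =====
-- the dangerous_chars list of A, as one-character strings
def dangerousCharsA : List String := ["'", "\"", ";", "\\", "/", "*", "?", "<", ">", "|"]

def clean_search_keyword (keyword : String) : String :=
  if keyword = "" then ""
  else
    let k1 := PySem.Str.strip keyword
    let k2 := if 100 < PySem.Str.len k1 then PySem.Str.slice k1 none (some 100) else k1
    dangerousCharsA.foldl (fun k c => PySem.Str.replace k c "") k2

-- ===== PORT B =====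
-- the frozenset of dangerous characters of B
def dangerousSetB : PySem.Set Char := PySem.Set.ofList ['\'', '"', ';', '\\', '/', '*', '?', '<', '>', '|']

def clean_search_keyword_alt (keyword : String) : String :=
  if keyword = "" then ""
  else
    let k1 := PySem.Str.strip keyword
    let k2 := if 100 < PySem.Str.len k1 then PySem.Str.slice k1 none (some 100) else k1
    PySem.Str.join "" ((k2.toList.filter (fun c => !(dangerousSetB.contains c))).map (fun c => String.ofList [c]))

-- ===== PRECONDITION & SPEC =====
def Spec_clean_search_keyword (keyword : String) (out : String) : Prop := out = clean_search_keyword_alt keyword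
instance (keyword : String) (out : String) : Decidable (Spec_clean_search_keyword keyword out) := by unfold Spec_clean_search_keyword; infer_instance

-- ===== CLAIM (what is proved, stated in full; the proofs are below) =====
def Claim_equal_clean_search_keyword : Prop := ∀ (keyword : String), Dom_clean_search_keyword keyword → Spec_clean_search_keyword keyword (clean_search_keyword keyword)

-- ===== LEMMAS AND PROOFS =====

-- replace.go with a single-character pattern and empty replacement filters that character out
theorem replace_go_single (c : Char) :
    ∀ (l : List Char) (fuel : Nat) (acc : List Char), l.length ≤ fuel →
      PySem.Chars.replace.go [c] [] fuel l acc = acc.reverse ++ l.filter (fun x => x ≠ c) := by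
  intro l
  induction l with
  | nil =>
      intro fuel acc _
      cases fuel <;> simp [PySem.Chars.replace.go]
  | cons h t ih =>
      intro fuel acc hle
      cases fuel with
      | zero => simp at hle
      | succ n =>
          by_cases hc : h = c
          · subst hc
            simp [PySem.Chars.replace.go, List.isPrefixOf, ih n acc (by simpa using hle)]
          · have hc' : ¬ c = h := fun e => hc e.symm
            simp [PySem.Chars.replace.go, List.isPrefixOf, hc, hc',
              ih n (h :: acc) (by simpa using hle)]

theorem replace_single (s : List Char) (c : Char) :
    PySem.Chars.replace s [c] [] = s.filter (fun x => x ≠ c) := by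
  simp [PySem.Chars.replace, replace_go_single c s s.length [] le_rfl]

-- ===== VERDICT (by name: the statement is the Claim_ definition above) =====
theorem clean_search_keyword_spec : Claim_equal_clean_search_keyword := by
  unfold Claim_equal_clean_search_keyword
  intro keyword _
  unfold Spec_clean_search_keyword clean_search_keyword clean_search_keyword_alt
  by_cases h0 : keyword = ""
  · simp [h0]
  · simp only [h0, if_false, dangerousCharsA, List.foldl_cons, List.foldl_nil]
    apply String.toList_inj.mp
    generalize (if 100 < PySem.Str.len (PySem.Str.strip keyword) then
        PySem.Str.slice (PySem.Str.strip keyword) none (some 100)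
      else PySem.Str.strip keyword) = s
    simp only [PySem.Str.toList_replace, PySem.Str.toList_join, List.map_map]
    simp [replace_single, List.filter_filter]
    simp only [Function.comp_def]
    have hmk : ∀ c : Char, (String.ofList [c]).toList = [c] := fun c => by simp
    simp [hmk, PySem.Chars.join_nil_singletons]
    apply List.filter_congr
    intro x _
    simp [dangerousSetB, PySem.Set.ofList]
    ac_rfl
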